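-- pv_equiv track=rewrite | github.com/jerry11-tech/Prakriti | ml_service/report_generator.py | _generate_face_routine_html
-- ===== SOURCE A (Python) =====
-- def _generate_face_routine_html(insights: dict) -> str:
--     """Generate HTML for face care routine"""
--     face_analysis = insights.get('face_analysis', {})
--     routine = face_analysis.get('face_care_routine', {})
--
--     html = """
--         <div class="routine-boxes">
--     """
--
--     # Morning routine
--     if routine.get('morning'):
--         html += """
--             <div class="routine-box">
--                 <h4>🌅 Morning Routine</h4>
--                 <ul>
--         """
--         for item in routine.get('morning', []):
--             html += f"                        <li>{item}</li>\n"
--         html += """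
--                 </ul>
--             </div>
--         """
--
--     # Evening routine
--     if routine.get('evening'):
--         html += """
--             <div class="routine-box">
--                 <h4>🌙 Evening Routine</h4>
--                 <ul>
--         """
--         for item in routine.get('evening', []):
--             html += f"                        <li>{item}</li>\n"
--         html += """
--                 </ul>
--             </div>
--         """
--
--     # Weekly treatment
--     if routine.get('weekly'):
--         html += """
--             <div class="routine-box">
--                 <h4>📅 Weekly Treatment</h4>
--                 <ul>
--         """
--         for item in routine.get('weekly', []):
--             html += f"                        <li>{item}</li>\n"
--         html += """
--                 </ul>
--             </div>
--         """
--
--     # Monthly treatment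
--     if routine.get('monthly'):
--         html += """
--             <div class="routine-box">
--                 <h4>🎯 Monthly Deep Treatment</h4>
--                 <ul>
--         """
--         for item in routine.get('monthly', []):
--             html += f"                        <li>{item}</li>\n"
--         html += """
--                 </ul>
--             </div>
--         """
--
--     html += """
--         </div>
--     """
--     return html
-- ===== SOURCE B (Python) =====
-- def _generate_face_routine_html(insights: dict) -> str:
--     """Generate HTML for face care routine.
--
--     Recursive back-to-front decomposition: each call renders the tail of the
--     section table first, then prepends its own fully templated section box
--     (one join per box, no incremental string accumulation)."""
--     routine = insights.get('face_analysis', {}).get('face_care_routine', {})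
--
--     def render(sections):
--         if not sections:
--             return '\n        </div>\n    '
--         (key, heading), rest = sections[0], render(sections[1:])
--         items = routine.get(key)
--         if not items:
--             return rest
--         return ('\n            <div class="routine-box">\n                <h4>%s</h4>\n                <ul>\n        ' % heading
--                 + ''.join('                        <li>%s</li>\n' % it for it in items)
--                 + '\n                </ul>\n            </div>\n        '
--                 + rest)
--
--     return '\n        <div class="routine-boxes">\n    ' + render([
--         ('morning', '\U0001F305 Morning Routine'),
--         ('evening', '\U0001F319 Evening Routine'),
--         ('weekly', '\U0001F4C5 Weekly Treatment'),
--         ('monthly', '\U0001F3AF Monthly Deep Treatment'),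
--     ])
-- ===== Notes on version B (the rewrite author's own statement) =====
-- stated objective: alternative
-- what changed: Replaces A's four unrolled branches with forward string += accumulation by a recursive back-to-front composition over a (key, heading) table, each present section rendered as one templated box string joined from its items and prepended to the already-rendered suffix.
import Mathlib
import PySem

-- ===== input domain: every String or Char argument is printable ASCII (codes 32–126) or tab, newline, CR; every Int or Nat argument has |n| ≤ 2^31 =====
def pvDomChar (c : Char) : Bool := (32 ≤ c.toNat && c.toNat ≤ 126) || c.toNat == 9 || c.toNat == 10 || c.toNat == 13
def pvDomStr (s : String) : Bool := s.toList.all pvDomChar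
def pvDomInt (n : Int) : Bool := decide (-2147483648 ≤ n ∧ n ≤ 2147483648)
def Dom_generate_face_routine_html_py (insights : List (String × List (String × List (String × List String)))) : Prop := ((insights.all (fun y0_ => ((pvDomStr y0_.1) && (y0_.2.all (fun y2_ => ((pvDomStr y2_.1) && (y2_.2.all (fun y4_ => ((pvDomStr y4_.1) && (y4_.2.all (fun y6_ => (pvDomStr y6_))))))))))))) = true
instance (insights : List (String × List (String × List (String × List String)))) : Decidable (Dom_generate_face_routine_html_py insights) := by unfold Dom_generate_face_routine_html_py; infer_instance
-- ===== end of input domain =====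

-- B replaces A's four unrolled forward-accumulating branches by a recursive
-- back-to-front composition over a (key, heading) section table (objective: alternative).

-- ===== PORT A =====
-- Python truthiness of routine.get(key): None and [] are falsy
def pvTruthy (o : Option (List String)) : Bool :=
  match o with
  | none => false
  | some l => !l.isEmpty

def generate_face_routine_html_py (insights : List (String × List (String × List (String × List String)))) : String :=
  let face_analysis := (PySem.Dict.mk insights).getD "face_analysis" []
  let routine := (PySem.Dict.mk face_analysis).getD "face_care_routine" []
  let rd := PySem.Dict.mk routine
  let html := "\n        <div class=\"routine-boxes\">\n    "
  let html := if pvTruthy (rd.get? "morning") then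
      let html := html ++ "\n            <div class=\"routine-box\">\n                <h4>🌅 Morning Routine</h4>\n                <ul>\n        "
      let html := (rd.getD "morning" []).foldl
        (fun h item => h ++ ("                        <li>" ++ item ++ "</li>\n")) html
      html ++ "\n                </ul>\n            </div>\n        "
    else html
  let html := if pvTruthy (rd.get? "evening") then
      let html := html ++ "\n            <div class=\"routine-box\">\n                <h4>🌙 Evening Routine</h4>\n                <ul>\n        "
      let html := (rd.getD "evening" []).foldl
        (fun h item => h ++ ("                        <li>" ++ item ++ "</li>\n")) html
      html ++ "\n                </ul>\n            </div>\n        "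
    else html
  let html := if pvTruthy (rd.get? "weekly") then
      let html := html ++ "\n            <div class=\"routine-box\">\n                <h4>📅 Weekly Treatment</h4>\n                <ul>\n        "
      let html := (rd.getD "weekly" []).foldl
        (fun h item => h ++ ("                        <li>" ++ item ++ "</li>\n")) html
      html ++ "\n                </ul>\n            </div>\n        "
    else html
  let html := if pvTruthy (rd.get? "monthly") then
      let html := html ++ "\n            <div class=\"routine-box\">\n                <h4>🎯 Monthly Deep Treatment</h4>\n                <ul>\n        "
      let html := (rd.getD "monthly" []).foldl
        (fun h item => h ++ ("                        <li>" ++ item ++ "</li>\n")) html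
      html ++ "\n                </ul>\n            </div>\n        "
    else html
  html ++ "\n        </div>\n    "

-- ===== PORT B =====
-- recursive back-to-front renderer: render the tail first, prepend this section's box
def pvRender (rd : PySem.Dict String (List String)) : List (String × String) → String
  | [] => "\n        </div>\n    "
  | (key, heading) :: rest =>
    let r := pvRender rd rest
    match rd.get? key with
    | none => r
    | some items =>
      if items.isEmpty then r
      else
        ("\n            <div class=\"routine-box\">\n                <h4>" ++ heading ++ "</h4>\n                <ul>\n        ")
        ++ String.join (items.map (fun it => "                        <li>" ++ it ++ "</li>\n"))
        ++ "\n                </ul>\n            </div>\n        "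
        ++ r

def generate_face_routine_html_py_alt (insights : List (String × List (String × List (String × List String)))) : String :=
  let routine := PySem.Dict.mk
    ((PySem.Dict.mk ((PySem.Dict.mk insights).getD "face_analysis" [])).getD "face_care_routine" [])
  "\n        <div class=\"routine-boxes\">\n    " ++
    pvRender routine
      [("morning", "🌅 Morning Routine"),
       ("evening", "🌙 Evening Routine"),
       ("weekly", "📅 Weekly Treatment"),
       ("monthly", "🎯 Monthly Deep Treatment")]

-- ===== PRECONDITION & SPEC =====
def Spec_generate_face_routine_html_py (insights : List (String × List (String × List (String × List String)))) (out : String) : Prop := out = generate_face_routine_html_py_alt insights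
instance (insights : List (String × List (String × List (String × List String)))) (out : String) : Decidable (Spec_generate_face_routine_html_py insights out) := by unfold Spec_generate_face_routine_html_py; infer_instance

-- ===== CLAIM =====
def Claim_equal_generate_face_routine_html_py : Prop := ∀ (insights : List (String × List (String × List (String × List String)))), Dom_generate_face_routine_html_py insights → Spec_generate_face_routine_html_py insights (generate_face_routine_html_py insights)

-- ===== LEMMAS AND PROOFS =====
theorem pv_foldl_app (xs : List String) (a : String) :
    xs.foldl (· ++ ·) a = a ++ xs.foldl (· ++ ·) "" := by
  induction xs generalizing a with
  | nil => simp [String.append_empty]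
  | cons x xs ih =>
    simp only [List.foldl_cons]
    rw [ih (a ++ x), ih ("" ++ x), String.empty_append, String.append_assoc]

theorem pv_join_cons (x : String) (xs : List String) :
    String.join (x :: xs) = x ++ String.join xs := by
  simp only [String.join, List.foldl_cons]
  rw [pv_foldl_app, String.empty_append]

theorem pv_foldl_li (pre post : String) (l : List String) (acc : String) :
    l.foldl (fun h item => h ++ (pre ++ item ++ post)) acc
      = acc ++ String.join (l.map (fun item => pre ++ item ++ post)) := by
  induction l generalizing acc with
  | nil => simp [String.join, String.append_empty]
  | cons x xs ih => rw [List.foldl_cons, ih, List.map_cons, pv_join_cons, String.append_assoc]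

-- one routine section of A: pulled out of the accumulator, with the full open tag as one string
theorem pv_sec (o : Option (List String)) (acc op : String) :
    (if pvTruthy o then
       ((o.getD []).foldl
         (fun h item => h ++ ("                        <li>" ++ item ++ "</li>\n")) (acc ++ op))
         ++ "\n                </ul>\n            </div>\n        "
     else acc)
    = acc ++ (if pvTruthy o then
        op ++ String.join ((o.getD []).map (fun item => "                        <li>" ++ item ++ "</li>\n"))
           ++ "\n                </ul>\n            </div>\n        "
      else "") := by
  cases o with
  | none => simp [pvTruthy, String.append_empty]
  | some items =>
    by_cases he : items.isEmpty <;>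
      simp only [pvTruthy, he, Bool.not_true, Bool.not_false, Option.getD_some,
                 Bool.false_eq_true, if_true, if_false]
    · simp [String.append_empty]
    · rw [pv_foldl_li]
      simp [String.append_assoc]

-- ===== VERDICT =====
theorem generate_face_routine_html_py_spec : Claim_equal_generate_face_routine_html_py := by
  intro insights _
  unfold Spec_generate_face_routine_html_py
  unfold generate_face_routine_html_py generate_face_routine_html_py_alt
  dsimp only
  generalize (PySem.Dict.mk
    ((PySem.Dict.mk ((PySem.Dict.mk insights).getD "face_analysis" [])).getD "face_care_routine" [])) = rd
  rw [PySem.Dict.getD_eq_get?_getD, PySem.Dict.getD_eq_get?_getD,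
      PySem.Dict.getD_eq_get?_getD, PySem.Dict.getD_eq_get?_getD,
      pv_sec, pv_sec, pv_sec, pv_sec]
  cases hm : rd.get? "morning" <;> cases he : rd.get? "evening" <;>
    cases hw : rd.get? "weekly" <;> cases hmo : rd.get? "monthly" <;>
    simp [pvRender, hm, he, hw, hmo, pvTruthy,
          String.append_assoc, String.append_empty] <;>
    split_ifs <;>
    simp [String.append_assoc, String.empty_append]
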